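-- pv_equiv track=rewrite | github.com/EliasAroni2000/automatas | Aroni-tp1-v2.py | tokenGoto
-- ===== SOURCE A (Python) =====
-- estado_final = "estado final"
--
-- estadoNoFinal = "estado no aceptado"
--
-- estadoTrampa = "estado trampa"
--
-- def tokenGoto(lexema):
--     estado = 0
--     estadoFinal = [4]
--     caracter = {0:{'g':1},1:{'o':2},2:{'t':3},3:{'o':4},4:{}}
--     for c in lexema:
--         if c in caracter[estado]:
--             estado = caracter[estado][c]
--         else:
--             estado = -1
--             break
--     if estado == -1:
--         return estadoTrampa
--     if estado in estadoFinal: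
--         return estado_final
--     else:
--         return estadoNoFinal
-- ===== SOURCE B (Python) =====
-- estado_final = "estado final"
-- estadoNoFinal = "estado no aceptado"
-- estadoTrampa = "estado trampa"
--
-- def tokenGoto(lexema):
--     # closed-form: exact keyword match -> final; proper/empty prefix -> non-final; else trap
--     if lexema == "goto":
--         return estado_final
--     if "goto".startswith(lexema):
--         return estadoNoFinal
--     return estadoTrampa
-- ===== Notes on version B (the rewrite author's own statement) =====
-- stated objective: simpler
-- what changed: Replaced the explicit DFA transition table and per-character state loop with a closed-form check: equality with the target keyword (final), prefix test via str.startswith (non-final), otherwise trap.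
import Mathlib
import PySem

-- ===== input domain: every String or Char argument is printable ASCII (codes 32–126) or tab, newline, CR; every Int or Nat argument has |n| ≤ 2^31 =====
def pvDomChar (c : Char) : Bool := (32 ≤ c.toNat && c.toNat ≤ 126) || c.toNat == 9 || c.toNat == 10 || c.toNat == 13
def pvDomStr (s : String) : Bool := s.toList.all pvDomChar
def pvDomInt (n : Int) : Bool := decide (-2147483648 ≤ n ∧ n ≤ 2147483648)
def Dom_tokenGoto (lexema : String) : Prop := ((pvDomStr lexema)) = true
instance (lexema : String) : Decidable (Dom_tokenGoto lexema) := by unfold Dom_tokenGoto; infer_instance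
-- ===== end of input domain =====

-- B replaces A's DFA transition table and per-character loop with a closed-form
-- equality/prefix check against the target keyword (objective: simpler).

-- ===== PORT A =====
-- the dict-of-dicts 'caracter' lookup: 'c in caracter[estado]' + 'caracter[estado][c]',
-- rendered as an Option-valued table (none = key absent)
def tokenGotoTrans (estado : Int) (c : Char) : Option Int :=
  if estado = 0 then (if c = 'g' then some 1 else none)
  else if estado = 1 then (if c = 'o' then some 2 else none)
  else if estado = 2 then (if c = 't' then some 3 else none)
  else if estado = 3 then (if c = 'o' then some 4 else none)
  else none  -- state 4: empty inner dict

-- A's 'for c in lexema' with the 'estado = -1; break'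
def tokenGotoLoop (estado : Int) : List Char → Int
  | [] => estado
  | c :: cs =>
    match tokenGotoTrans estado c with
    | some e' => tokenGotoLoop e' cs
    | none => -1

def tokenGoto (lexema : String) : String :=
  let estado := tokenGotoLoop 0 lexema.toList
  if estado = -1 then "estado trampa"
  else if estado = 4 then "estado final"  -- estadoFinal = [4]
  else "estado no aceptado"

-- ===== PORT B =====
def tokenGoto_alt (lexema : String) : String :=
  if lexema == "goto" then "estado final"
  else if PySem.Str.startswith "goto" lexema then "estado no aceptado"
  else "estado trampa"

-- ===== PRECONDITION & SPEC =====
def Spec_tokenGoto (lexema : String) (out : String) : Prop := out = tokenGoto_alt lexema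
instance (lexema : String) (out : String) : Decidable (Spec_tokenGoto lexema out) := by unfold Spec_tokenGoto; infer_instance

-- ===== CLAIM (what is proved, stated in full; the proofs are below) =====
def Claim_equal_tokenGoto : Prop := ∀ (lexema : String), Dom_tokenGoto lexema → Spec_tokenGoto lexema (tokenGoto lexema)

-- ===== LEMMAS AND PROOFS =====

-- lists of length ≥ 5 always drive A's loop into -1
lemma tokenGotoLoop_long (a b c d e : Char) (t : List Char) :
    tokenGotoLoop 0 (a :: b :: c :: d :: e :: t) = -1 := by
  by_cases ha : a = 'g' <;> by_cases hb : b = 'o' <;> by_cases hc : c = 't' <;>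
    by_cases hd : d = 'o' <;>
    simp [tokenGotoLoop, tokenGotoTrans, ha, hb, hc, hd]

lemma tokenGoto_key (l : List Char) :
    (if tokenGotoLoop 0 l = -1 then "estado trampa"
     else if tokenGotoLoop 0 l = 4 then "estado final" else "estado no aceptado")
    = (if l = ['g','o','t','o'] then "estado final"
       else if l <+: ['g','o','t','o'] then "estado no aceptado" else "estado trampa") := by
  match l with
  | [] => simp [tokenGotoLoop]
  | [a] =>
    by_cases ha : a = 'g' <;>
      simp [tokenGotoLoop, tokenGotoTrans, ha, List.cons_prefix_cons]
  | [a, b] =>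
    by_cases ha : a = 'g' <;> by_cases hb : b = 'o' <;>
      simp [tokenGotoLoop, tokenGotoTrans, ha, hb, List.cons_prefix_cons]
  | [a, b, c] =>
    by_cases ha : a = 'g' <;> by_cases hb : b = 'o' <;> by_cases hc : c = 't' <;>
      simp [tokenGotoLoop, tokenGotoTrans, ha, hb, hc, List.cons_prefix_cons]
  | [a, b, c, d] =>
    by_cases ha : a = 'g' <;> by_cases hb : b = 'o' <;> by_cases hc : c = 't' <;>
      by_cases hd : d = 'o' <;>
      simp [tokenGotoLoop, tokenGotoTrans, ha, hb, hc, hd, List.cons_prefix_cons]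
  | a :: b :: c :: d :: e :: t =>
    rw [tokenGotoLoop_long]
    have hne : (a :: b :: c :: d :: e :: t) ≠ ['g','o','t','o'] := by
      intro h; simpa using congrArg List.length h
    have hnp : ¬ (a :: b :: c :: d :: e :: t) <+: ['g','o','t','o'] := by
      intro h; have := h.length_le; simp at this; omega
    simp [hne, hnp]

-- ===== VERDICT (by name: the statement is the Claim_ definition above) =====
theorem tokenGoto_spec : Claim_equal_tokenGoto := by
  intro lexema _
  unfold Spec_tokenGoto tokenGoto tokenGoto_alt
  have e1 : (lexema = "goto") ↔ lexema.toList = ['g','o','t','o'] :=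
    String.toList_inj.symm
  have h := tokenGoto_key lexema.toList
  simp only [beq_iff_eq]
  by_cases hq : lexema.toList = ['g','o','t','o'] <;>
    by_cases hp : lexema.toList <+: ['g','o','t','o'] <;>
    simp [hq, hp, e1, PySem.Chars.startswith_iff] at h ⊢ <;> try exact h
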